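-- pv_equiv track=rewrite | github.com/koratej/Language-Modeling | hw6_language.py | countStartWords
-- ===== SOURCE A (Python) =====
-- def getStartWords(corpus):
--     uniquestartwords=[]
--     for line in corpus:
--         if line[0] not in uniquestartwords:
--             uniquestartwords.append(line[0])
--     return uniquestartwords
--
-- def countStartWords(corpus):
--     countstartwords={}
--     allstartwords=[]
--     for line in corpus:
--         allstartwords.append(line[0])
--     for startword in getStartWords(corpus):
--         countstartwords[startword]=allstartwords.count(startword)
--     return countstartwords
-- ===== SOURCE B (Python) =====
-- def countStartWords(corpus):
--     counts = {}
--     for line in corpus: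
--         w = line[0]
--         counts[w] = counts.get(w, 0) + 1
--     return counts
-- ===== Notes on version B (the rewrite author's own statement) =====
-- stated objective: idiomatic
-- what changed: Replaces A's three passes (collect all first words, dedup them, then an allstartwords.count scan per unique word) with a single pass that increments a counter dict keyed by each line's first word.
import Mathlib
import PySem

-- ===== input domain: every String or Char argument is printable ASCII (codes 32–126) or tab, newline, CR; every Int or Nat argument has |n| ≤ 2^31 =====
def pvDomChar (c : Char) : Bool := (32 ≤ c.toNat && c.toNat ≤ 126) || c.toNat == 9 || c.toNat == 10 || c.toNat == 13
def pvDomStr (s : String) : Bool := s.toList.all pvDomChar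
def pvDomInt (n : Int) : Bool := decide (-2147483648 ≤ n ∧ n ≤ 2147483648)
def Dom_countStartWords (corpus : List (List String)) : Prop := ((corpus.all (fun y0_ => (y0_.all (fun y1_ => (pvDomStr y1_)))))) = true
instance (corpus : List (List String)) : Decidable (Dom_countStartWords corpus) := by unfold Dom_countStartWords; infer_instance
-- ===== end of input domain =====

-- B replaces A's three passes (collect first words, dedup, per-unique .count scan) with one
-- counter-dict pass: idiomatic single-pass counting (timing run did not confirm a speedup).


-- ===== PORT A =====
-- line[0] is ported as pyGetD line 0 ""; Pre_ guarantees every line is nonempty, where this is exact.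
def getStartWords (corpus : List (List String)) : List String :=
  corpus.foldl (fun uniq line =>
    let w := PySem.List.pyGetD line 0 ""
    if uniq.contains w then uniq else uniq ++ [w]) []

def countStartWords (corpus : List (List String)) : List (String × Int) :=
  let allstartwords : List String :=
    corpus.foldl (fun acc line => acc ++ [PySem.List.pyGetD line 0 ""]) []
  let d : PySem.Dict String Int :=
    (getStartWords corpus).foldl
      (fun d w => d.insert w ((PySem.List.count allstartwords w : Int))) PySem.Dict.empty
  d.items

-- ===== PORT B =====
def countStartWords_alt (corpus : List (List String)) : List (String × Int) :=
  (corpus.foldl (fun d line =>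
      let w := PySem.List.pyGetD line 0 ""
      d.insert w (d.getD w 0 + 1)) PySem.Dict.empty).items

-- ===== PRECONDITION & SPEC =====
-- Pre_ excludes corpora containing an empty line: there line[0] raises IndexError in A (and in B).
def Pre_countStartWords (corpus : List (List String)) : Prop := ∀ line ∈ corpus, line ≠ []
instance (corpus : List (List String)) : Decidable (Pre_countStartWords corpus) := by unfold Pre_countStartWords; infer_instance
def pvWitness_countStartWords : List (List String) := [["the", "cat"], ["a", "dog"], ["the"]]

def Spec_countStartWords (corpus : List (List String)) (out : List (String × Int)) : Prop := out = countStartWords_alt corpus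
instance (corpus : List (List String)) (out : List (String × Int)) : Decidable (Spec_countStartWords corpus out) := by unfold Spec_countStartWords; infer_instance

-- ===== CLAIM (what is proved, stated in full; the proofs are below) =====
def Claim_equal_countStartWords : Prop := ∀ (corpus : List (List String)), Dom_countStartWords corpus → Pre_countStartWords corpus → Spec_countStartWords corpus (countStartWords corpus)

-- ===== LEMMAS AND PROOFS =====

-- the first word of each line, the list both programs conceptually count over
def pvFirsts (corpus : List (List String)) : List String :=
  corpus.map (fun line => PySem.List.pyGetD line 0 "")

theorem pvAll_eq_firsts (corpus : List (List String)) :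
    corpus.foldl (fun acc line => acc ++ [PySem.List.pyGetD line 0 ""]) [] = pvFirsts corpus := by
  have h : ∀ (acc : List String),
      corpus.foldl (fun acc line => acc ++ [PySem.List.pyGetD line 0 ""]) acc
        = acc ++ pvFirsts corpus := by
    induction corpus with
    | nil => intro acc; simp [pvFirsts]
    | cons l t ih => intro acc; simp [List.foldl_cons, pvFirsts, ih, List.map_cons]
  simpa using h []

theorem pvGetStart_eq_ofList (corpus : List (List String)) :
    getStartWords corpus = PySem.Set.ofList (pvFirsts corpus) := by
  unfold getStartWords
  rw [PySem.Set.ofList_eq_foldl, pvFirsts, List.foldl_map]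
  rfl

theorem pvB_eq_counter (corpus : List (List String)) :
    countStartWords_alt corpus = (PySem.Dict.counter (pvFirsts corpus)).items := by
  unfold countStartWords_alt
  rw [← PySem.Dict.foldl_insert_getD_add_one_eq_counter, pvFirsts, List.foldl_map]

-- ===== VERDICT (by name: the statement is the Claim_ definition above) =====
theorem countStartWords_spec : Claim_equal_countStartWords := by
  intro corpus _ _
  unfold Spec_countStartWords countStartWords
  rw [pvAll_eq_firsts, pvGetStart_eq_ofList, pvB_eq_counter, PySem.Dict.items_counter]
  dsimp only
  have h := PySem.Dict.items_foldl_insert_fresh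
        (l := PySem.Set.ofList (pvFirsts corpus)) (d := PySem.Dict.empty)
        (k := fun w => w)
        (v := fun w => (PySem.List.count (pvFirsts corpus) w : Int))
        (fun a _ => by simp [PySem.Dict.contains_empty])
        (by simp)
  rw [h]
  simp [PySem.List.count, PySem.Dict.empty]
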